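-- pv_equiv track=rewrite | github.com/DhritiShah04/Mini-Project | backend/reviews/analysis.py | classify_reviews_by_user
-- ===== SOURCE A (Python) =====
-- def classify_reviews_by_user(reviews, keywords_dict):
--     categorized = {user: [] for user in keywords_dict.keys()}
--     for review in reviews:
--         review_lower = review.lower()
--         for user, keywords in keywords_dict.items():
--             if any(word in review_lower for word in keywords):
--                 categorized[user].append(review)
--     return categorized
-- ===== SOURCE B (Python) =====
-- def classify_reviews_by_user(reviews, keywords_dict):
--     # Inverted index: each distinct keyword maps to the users listing it, so a
--     # keyword shared by several users is substring-tested once per review; per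
--     # review we compute the matched-user set and then fill the buckets.
--     index = {}
--     for user, keywords in keywords_dict.items():
--         for word in keywords:
--             index.setdefault(word, []).append(user)
--     buckets = {user: [] for user in keywords_dict}
--     for review in reviews:
--         low = review.lower()
--         matched = set()
--         for word, users in index.items():
--             if word in low:
--                 matched.update(users)
--         for user in keywords_dict:
--             if user in matched:
--                 buckets[user].append(review)
--     return buckets
-- ===== Notes on version B (the rewrite author's own statement) =====
-- stated objective: faster
-- what changed: B replaces A's per-user any(keyword in review) inner test by a staged inverted index: it first builds a keyword->users dict, then for each review substring-tests each DISTINCT keyword once, collects the matched users into a set, and appends the review to the buckets by set membership; Pre_ excludes association lists with duplicate user keys, which cannot arise from a Python dict and on which the two traversals differ on an unspecified corner.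
import Mathlib
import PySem

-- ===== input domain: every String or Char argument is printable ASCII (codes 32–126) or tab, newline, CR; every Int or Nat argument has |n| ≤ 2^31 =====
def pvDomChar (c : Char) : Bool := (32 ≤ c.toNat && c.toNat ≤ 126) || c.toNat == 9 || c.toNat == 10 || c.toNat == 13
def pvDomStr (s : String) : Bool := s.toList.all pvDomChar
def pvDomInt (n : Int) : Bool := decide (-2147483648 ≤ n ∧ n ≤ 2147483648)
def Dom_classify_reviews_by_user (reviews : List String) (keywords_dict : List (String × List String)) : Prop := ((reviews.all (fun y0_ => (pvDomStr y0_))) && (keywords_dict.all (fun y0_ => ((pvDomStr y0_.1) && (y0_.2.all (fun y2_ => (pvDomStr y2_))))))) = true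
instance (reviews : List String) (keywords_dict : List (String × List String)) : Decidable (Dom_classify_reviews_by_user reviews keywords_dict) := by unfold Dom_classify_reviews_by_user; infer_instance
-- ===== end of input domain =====

-- B replaces A's per-user any(keyword in review) inner test with a staged inverted
-- keyword->users index and a per-review matched-user set; alternative structure, same results.


-- ===== PORT A =====
def classify_reviews_by_user (reviews : List String) (keywords_dict : List (String × List String)) : List (String × List String) :=
  -- categorized = {user: [] for user in keywords_dict.keys()}
  let categorized : PySem.Dict String (List String) :=
    (keywords_dict.map (fun p => p.1)).foldl
      (fun d user => d.insert user ([] : List String)) PySem.Dict.empty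
  (reviews.foldl (fun categorized review =>
      let review_lower := PySem.Str.lower review
      keywords_dict.foldl (fun categorized p =>
        if p.2.any (fun word => PySem.Str.isIn word review_lower) then
          -- categorized[user].append(review); user is always a key of categorized here,
          -- so Dict.modify with default [] is exact (no KeyError is reachable)
          categorized.modify p.1 [] (fun l => l ++ [review])
        else categorized) categorized)
    categorized).items

-- ===== PORT B =====
-- inverted index: for user, keywords …: for word in keywords: index.setdefault(word, []).append(user)
-- (setdefault(w, []).append(u) ≡ index[w] = index.get(w, []) + [u] keeping position: Dict.modify is exact)
def pvIndexB (keywords_dict : List (String × List String)) : PySem.Dict String (List String) :=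
  keywords_dict.foldl (fun index p =>
    p.2.foldl (fun index word => index.modify word [] (fun users => users ++ [p.1])) index)
    PySem.Dict.empty

-- matched = set(); for word, users in index.items(): if word in low: matched.update(users)
def pvMatchedB (index : PySem.Dict String (List String)) (low : String) : PySem.Set String :=
  index.items.foldl (fun matched wi =>
    if PySem.Str.isIn wi.1 low then PySem.Set.update matched wi.2 else matched)
    PySem.Set.empty

def classify_reviews_by_user_alt (reviews : List String) (keywords_dict : List (String × List String)) : List (String × List String) :=
  let index := pvIndexB keywords_dict
  -- buckets = {user: [] for user in keywords_dict}
  let buckets : PySem.Dict String (List String) :=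
    keywords_dict.foldl (fun d p => d.insert p.1 ([] : List String)) PySem.Dict.empty
  (reviews.foldl (fun buckets review =>
      let matched := pvMatchedB index (PySem.Str.lower review)
      -- for user in keywords_dict: if user in matched: buckets[user].append(review)
      (keywords_dict.map (fun p => p.1)).foldl (fun buckets user =>
        if matched.contains user then buckets.modify user [] (fun l => l ++ [review])
        else buckets) buckets)
    buckets).items

-- ===== PRECONDITION & SPEC =====
-- Pre_ excludes association lists with duplicate user keys: a Python dict cannot contain
-- them, and on such lists per-duplicate appends are an unspecified corner no caller can reach.
def Pre_classify_reviews_by_user (reviews : List String) (keywords_dict : List (String × List String)) : Prop :=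
  (keywords_dict.map (fun p => p.1)).Nodup
instance (reviews : List String) (keywords_dict : List (String × List String)) : Decidable (Pre_classify_reviews_by_user reviews keywords_dict) := by unfold Pre_classify_reviews_by_user; infer_instance
def pvWitness_classify_reviews_by_user : List String × (List (String × List String)) :=
  (["Great food", "bad service"], [("alice", ["great"]), ("bob", ["bad"])])

def Spec_classify_reviews_by_user (reviews : List String) (keywords_dict : List (String × List String)) (out : List (String × List String)) : Prop := out = classify_reviews_by_user_alt reviews keywords_dict
instance (reviews : List String) (keywords_dict : List (String × List String)) (out : List (String × List String)) : Decidable (Spec_classify_reviews_by_user reviews keywords_dict out) := by unfold Spec_classify_reviews_by_user; infer_instance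

-- ===== CLAIM (what is proved, stated in full; the proofs are below) =====
def Claim_equal_classify_reviews_by_user : Prop := ∀ (reviews : List String) (keywords_dict : List (String × List String)), Dom_classify_reviews_by_user reviews keywords_dict → Pre_classify_reviews_by_user reviews keywords_dict → Spec_classify_reviews_by_user reviews keywords_dict (classify_reviews_by_user reviews keywords_dict)

-- ===== LEMMAS AND PROOFS =====

-- the flat (keyword, user) occurrence list behind B's inverted index
def pvPairs (kd : List (String × List String)) : List (String × String) :=
  kd.flatMap (fun p => p.2.map (fun w => (w, p.1)))

theorem pv_index_eq (kd : List (String × List String)) :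
    pvIndexB kd = (pvPairs kd).foldl
      (fun d q => d.modify q.1 [] (fun users => users ++ [q.2])) PySem.Dict.empty := by
  unfold pvIndexB pvPairs
  rw [List.foldl_flatMap]
  simp only [List.foldl_map]

theorem pv_getD_index (kd : List (String × List String)) (w : String) :
    (pvIndexB kd).getD w [] = ((pvPairs kd).filter (fun q => q.1 == w)).map (fun q => q.2) := by
  rw [pv_index_eq, PySem.Dict.getD_foldl_modify_append]
  simp

theorem pv_keys_index (kd : List (String × List String)) :
    (pvIndexB kd).keys = PySem.Set.ofList ((pvPairs kd).map (fun q => q.1)) := by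
  rw [pv_index_eq, PySem.Dict.keys_foldl_modify_key]
  simp [PySem.Set.update_nil_left]

theorem pv_nodup_keys_index (kd : List (String × List String)) :
    (pvIndexB kd).keys.Nodup := by
  rw [pv_keys_index]
  exact PySem.Set.nodup_ofList _

theorem pv_mem_matched_fold (items : List (String × List String)) (low : String)
    (m : PySem.Set String) (u : String) :
    u ∈ items.foldl (fun matched wi =>
        if PySem.Str.isIn wi.1 low then PySem.Set.update matched wi.2 else matched) m
      ↔ u ∈ m ∨ ∃ wi ∈ items, PySem.Str.isIn wi.1 low = true ∧ u ∈ wi.2 := by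
  induction items generalizing m with
  | nil => simp
  | cons a l ih =>
    rw [List.foldl_cons, ih]
    by_cases h : PySem.Str.isIn a.1 low = true
    · rw [if_pos h]
      simp only [PySem.Set.mem_update, List.mem_cons]
      constructor
      · rintro ((hm | hu) | ⟨wi, hwi, hlow2, hu⟩)
        · exact Or.inl hm
        · exact Or.inr ⟨a, Or.inl rfl, h, hu⟩
        · exact Or.inr ⟨wi, Or.inr hwi, hlow2, hu⟩
      · rintro (hm | ⟨wi, (rfl | hwi), hlow, hu⟩)
        · exact Or.inl (Or.inl hm)
        · exact Or.inl (Or.inr hu)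
        · exact Or.inr ⟨wi, hwi, hlow, hu⟩
    · rw [if_neg h]
      simp only [List.mem_cons]
      constructor
      · rintro (hm | ⟨wi, hwi, hlow, hu⟩)
        · exact Or.inl hm
        · exact Or.inr ⟨wi, Or.inr hwi, hlow, hu⟩
      · rintro (hm | ⟨wi, (rfl | hwi), hlow, hu⟩)
        · exact Or.inl hm
        · exact absurd hlow h
        · exact Or.inr ⟨wi, hwi, hlow, hu⟩

-- for a user key of kd (keys nodup), membership in B's matched set is exactly A's any-test
theorem pv_matched_eq_any (kd : List (String × List String))
    (hnd : (kd.map (fun p => p.1)).Nodup) (low : String)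
    (p : String × List String) (hp : p ∈ kd) :
    (pvMatchedB (pvIndexB kd) low).contains p.1
      = p.2.any (fun word => PySem.Str.isIn word low) := by
  rw [Bool.eq_iff_iff, PySem.Set.contains_iff]
  unfold pvMatchedB
  rw [pv_mem_matched_fold]
  simp only [PySem.Set.empty, List.not_mem_nil, false_or, List.any_eq_true]
  constructor
  · rintro ⟨wi, hwi, hlow, hu⟩
    have hitem : (wi.1, wi.2) ∈ (pvIndexB kd).items := by simpa using hwi
    have hget : (pvIndexB kd).getD wi.1 [] = wi.2 :=
      PySem.Dict.getD_of_mem_items _ hitem (pv_nodup_keys_index kd) []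
    rw [pv_getD_index] at hget
    rw [← hget, List.mem_map] at hu
    obtain ⟨q, hq, hq2⟩ := hu
    rw [List.mem_filter] at hq
    obtain ⟨hqpairs, hqw⟩ := hq
    have hq1 : q.1 = wi.1 := by simpa using hqw
    unfold pvPairs at hqpairs
    rw [List.mem_flatMap] at hqpairs
    obtain ⟨p', hp', hq'⟩ := hqpairs
    rw [List.mem_map] at hq'
    obtain ⟨w, hw, hwq⟩ := hq'
    have hkey : p'.1 = p.1 := by rw [← hq2, ← hwq]
    have hpp : p' = p := List.inj_on_of_nodup_map hnd hp' hp hkey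
    refine ⟨w, by rw [← hpp]; exact hw, ?_⟩
    have hww : w = wi.1 := by rw [← hq1, ← hwq]
    rw [hww]; exact hlow
  · rintro ⟨w, hw, hlow⟩
    -- (w, p.1) ∈ pvPairs, so w is a key of the index and p.1 is in its bucket
    have hqmem : (w, p.1) ∈ pvPairs kd := by
      simp only [pvPairs, List.mem_flatMap, List.mem_map]
      exact ⟨p, hp, w, hw, rfl⟩
    have hkmem : w ∈ (pvIndexB kd).keys := by
      rw [pv_keys_index, PySem.Set.mem_ofList]
      exact List.mem_map.mpr ⟨(w, p.1), hqmem, rfl⟩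
    refine ⟨(w, (pvIndexB kd).getD w []), ?_, hlow, ?_⟩
    · have := PySem.Dict.items_eq_map_keys (pvIndexB kd) (pv_nodup_keys_index kd) ([] : List String)
      rw [this]
      exact List.mem_map.mpr ⟨w, hkmem, rfl⟩
    · rw [pv_getD_index]
      exact List.mem_map.mpr ⟨(w, p.1), List.mem_filter.mpr ⟨hqmem, by simp⟩, rfl⟩

-- ===== VERDICT (by name: the statement is the Claim_ definition above) =====
theorem classify_reviews_by_user_spec : Claim_equal_classify_reviews_by_user := by
  intro reviews kd _ hpre
  unfold Spec_classify_reviews_by_user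
  have hpre' : (kd.map (fun p => p.1)).Nodup := hpre
  unfold classify_reviews_by_user classify_reviews_by_user_alt
  simp only [List.foldl_map]
  congr 1
  apply PySem.List.foldl_congr_mem
  intro acc r _
  apply PySem.List.foldl_congr_mem
  intro acc' p hp
  rw [pv_matched_eq_any kd hpre' (PySem.Str.lower r) p hp]
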